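-- pv_equiv track=rewrite | github.com/sylvesterakrong/comickids_backend | comickids_backend/core/utils.py | extract_panel_descriptions
-- ===== SOURCE A (Python) =====
-- def extract_panel_descriptions(script: str, num_panels=4) -> list[str]:
--     descriptions = []
--     current_desc = ""
--     for line in script.splitlines():
--         if line.strip().lower().startswith("panel"):
--             if current_desc:
--                 descriptions.append(current_desc.strip())
--             current_desc = ""
--         elif "scene description" in line.lower():
--             current_desc += line.split(":", 1)[-1].strip() + " "
--         elif (
--             current_desc
--             and not line.lower().startswith("dialogue")
--             and not line.lower().startswith("narration")
--         ):
--             current_desc += line.strip() + " "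
--     if current_desc:
--         descriptions.append(current_desc.strip())
--     # Always return num_panels descriptions
--     while len(descriptions) < num_panels:
--         descriptions.append("A generic educational comic panel for Ghanaian children.")
--     return descriptions[:num_panels]
-- ===== SOURCE B (Python) =====
-- FILLER = "A generic educational comic panel for Ghanaian children."
--
--
-- def _is_header(line):
--     return line.strip().lower().startswith("panel")
--
--
-- def _block_desc(block):
--     acc = ""
--     for line in block:
--         low = line.lower()
--         if "scene description" in low:
--             acc += line.split(":", 1)[-1].strip() + " "
--         elif acc and not low.startswith("dialogue") and not low.startswith("narration"):
--             acc += line.strip() + " "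
--     return acc
--
--
-- def extract_panel_descriptions(script: str, num_panels=4) -> list[str]:
--     # split the script into blocks: lines before any "panel" header, then one block per header
--     blocks = [[]]
--     for line in script.splitlines():
--         if _is_header(line):
--             blocks.append([])
--         else:
--             blocks[-1].append(line)
--     out = []
--     for b in blocks:
--         acc = _block_desc(b)
--         if acc:
--             out.append(acc.strip())
--     out = out + [FILLER] * max(0, num_panels - len(out))
--     return out[:num_panels]
-- ===== Notes on version B (the rewrite author's own statement) =====
-- stated objective: alternative
-- what changed: B first splits the script's lines into panel blocks (one pass), then maps each block through an independent description-accumulating helper and filters/pads, instead of A's single fold with two entangled mutable accumulators.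
import Mathlib
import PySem

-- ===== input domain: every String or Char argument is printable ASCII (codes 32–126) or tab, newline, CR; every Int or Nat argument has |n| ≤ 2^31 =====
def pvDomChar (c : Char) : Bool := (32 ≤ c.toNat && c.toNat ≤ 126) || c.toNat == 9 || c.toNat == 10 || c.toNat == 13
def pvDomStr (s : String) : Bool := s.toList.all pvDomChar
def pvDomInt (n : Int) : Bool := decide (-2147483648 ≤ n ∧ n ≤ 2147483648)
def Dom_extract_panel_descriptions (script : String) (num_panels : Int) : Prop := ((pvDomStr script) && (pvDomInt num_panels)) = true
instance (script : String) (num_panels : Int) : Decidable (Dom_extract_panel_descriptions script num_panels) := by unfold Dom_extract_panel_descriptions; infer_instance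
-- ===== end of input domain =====

-- B splits the lines into panel blocks and maps each block through an independent helper,
-- instead of A's single fold with two entangled accumulators (objective: alternative decomposition).


-- shared text-level predicates (both Python versions contain these identical expressions)
def pvIsHeader (line : String) : Bool :=
  PySem.Str.startswith (PySem.Str.lower (PySem.Str.strip line)) "panel"

def pvIsScene (line : String) : Bool :=
  PySem.Str.isIn "scene description" (PySem.Str.lower line)

def pvIsDlg (line : String) : Bool :=
  PySem.Str.startswith (PySem.Str.lower line) "dialogue"

def pvIsNarr (line : String) : Bool :=
  PySem.Str.startswith (PySem.Str.lower line) "narration"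

-- line.split(":", 1)[-1].strip()  (the split result is always non-empty, so [-1] never raises)
def pvScenePayload (line : String) : String :=
  PySem.Str.strip ((PySem.List.pyGet? ((PySem.Str.splitMax? line ":" 1).getD []) (-1)).getD "")

def pvFiller : String := "A generic educational comic panel for Ghanaian children."

-- ===== PORT A =====
def pvStepA (st : List String × String) (line : String) : List String × String :=
  if pvIsHeader line then
    (if st.2 ≠ "" then st.1 ++ [PySem.Str.strip st.2] else st.1, "")
  else if pvIsScene line then
    (st.1, st.2 ++ pvScenePayload line ++ " ")
  else if st.2 ≠ "" ∧ ¬ pvIsDlg line ∧ ¬ pvIsNarr line then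
    (st.1, st.2 ++ PySem.Str.strip line ++ " ")
  else st

-- A's trailing 'while len(descriptions) < num_panels: descriptions.append(...)'
def pvPadA (descs : List String) (num_panels : Int) : List String :=
  if (descs.length : Int) < num_panels then pvPadA (descs ++ [pvFiller]) num_panels
  else descs
termination_by (num_panels - descs.length).toNat
decreasing_by simp only [List.length_append, List.length_cons, List.length_nil]; omega

def extract_panel_descriptions (script : String) (num_panels : Int) : List String :=
  let st := (PySem.Str.splitlines script).foldl pvStepA ([], "")
  let descriptions := if st.2 ≠ "" then st.1 ++ [PySem.Str.strip st.2] else st.1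
  PySem.List.slice (pvPadA descriptions num_panels) none (some num_panels)

-- ===== PORT B =====
def pvBlockStep (acc : String) (line : String) : String :=
  if pvIsScene line then acc ++ pvScenePayload line ++ " "
  else if acc ≠ "" ∧ ¬ pvIsDlg line ∧ ¬ pvIsNarr line then acc ++ PySem.Str.strip line ++ " "
  else acc

def pvBlockDesc (block : List String) : String := block.foldl pvBlockStep ""

-- 'blocks.append([])' / 'blocks[-1].append(line)'
def pvBlocksStep (bs : List (List String)) (line : String) : List (List String) :=
  if pvIsHeader line then bs ++ [[]]
  else bs.dropLast ++ [(bs.getLast?.getD []) ++ [line]]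

def extract_panel_descriptions_alt (script : String) (num_panels : Int) : List String :=
  let blocks := (PySem.Str.splitlines script).foldl pvBlocksStep [[]]
  let out := blocks.foldl
    (fun out b => if pvBlockDesc b ≠ "" then out ++ [PySem.Str.strip (pvBlockDesc b)] else out) []
  let out := out ++ PySem.List.pyRepeat [pvFiller] (max 0 (num_panels - out.length))
  PySem.List.slice out none (some num_panels)

-- ===== PRECONDITION & SPEC =====
def Spec_extract_panel_descriptions (script : String) (num_panels : Int) (out : List String) : Prop := out = extract_panel_descriptions_alt script num_panels
instance (script : String) (num_panels : Int) (out : List String) : Decidable (Spec_extract_panel_descriptions script num_panels out) := by unfold Spec_extract_panel_descriptions; infer_instance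

-- ===== CLAIM (what is proved, stated in full; the proofs are below) =====
def Claim_equal_extract_panel_descriptions : Prop := ∀ (script : String) (num_panels : Int), Dom_extract_panel_descriptions script num_panels → Spec_extract_panel_descriptions script num_panels (extract_panel_descriptions script num_panels)

-- ===== LEMMAS AND PROOFS =====

-- proof-side recursive view of B's block splitting (built back-to-front)
def pvBlocks : List String → List (List String)
  | [] => [[]]
  | l :: ls =>
    if pvIsHeader l then [] :: pvBlocks ls
    else
      match pvBlocks ls with
      | [] => [[l]]
      | b :: bs => (l :: b) :: bs

def pvConsHead (x : List String) : List (List String) → List (List String)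
  | [] => [x]
  | b :: bs => (x ++ b) :: bs

def pvEmit (s : String) : List String := if s ≠ "" then [PySem.Str.strip s] else []

theorem pvBlocks_ne_nil (ls : List String) : pvBlocks ls ≠ [] := by
  cases ls with
  | nil => simp [pvBlocks]
  | cons l ls =>
    simp only [pvBlocks]
    split
    · simp
    · cases h : pvBlocks ls <;> simp

theorem pvFoldBlocks (ls : List String) (bs0 : List (List String)) (h : bs0 ≠ []) :
    ls.foldl pvBlocksStep bs0 = bs0.dropLast ++ pvConsHead (bs0.getLast?.getD []) (pvBlocks ls) := by
  induction ls generalizing bs0 with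
  | nil =>
    cases h' : pvBlocks ([] : List String) with
    | nil => exact absurd h' (pvBlocks_ne_nil [])
    | cons b bs =>
      simp only [pvBlocks] at h'
      cases h'
      simp only [List.foldl_nil, pvConsHead, List.append_nil]
      rcases List.eq_nil_or_concat bs0 with rfl | ⟨ys, y, rfl⟩
      · exact absurd rfl h
      · simp
  | cons l ls ih =>
    simp only [List.foldl_cons, pvBlocksStep]
    split
    · -- header: new empty block appended
      rw [ih (bs0 ++ [[]]) (by simp)]
      simp only [pvBlocks, *, if_pos]
      rcases List.eq_nil_or_concat bs0 with rfl | ⟨ys, y, rfl⟩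
      · exact absurd rfl h
      · cases h' : pvBlocks ls with
        | nil => exact absurd h' (pvBlocks_ne_nil ls)
        | cons b bs => simp [pvConsHead]
    · -- non-header: line appended to the last block
      rw [ih (bs0.dropLast ++ [bs0.getLast?.getD [] ++ [l]]) (by simp)]
      cases h' : pvBlocks ls with
      | nil => exact absurd h' (pvBlocks_ne_nil ls)
      | cons b bs =>
        simp only [pvBlocks, *]
        rcases List.eq_nil_or_concat bs0 with rfl | ⟨ys, y, rfl⟩
        · exact absurd rfl h
        · simp [pvConsHead]

-- A's fold, finished by the trailing flush, is the concatenation of the per-block emissions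
theorem pvFoldA (ls : List String) (descs : List String) (cur : String) :
    (if ((ls.foldl pvStepA (descs, cur)).2 ≠ "")
       then (ls.foldl pvStepA (descs, cur)).1 ++ [PySem.Str.strip (ls.foldl pvStepA (descs, cur)).2]
       else (ls.foldl pvStepA (descs, cur)).1)
    = descs ++ (match pvBlocks ls with
        | [] => []
        | b :: bs => pvEmit (b.foldl pvBlockStep cur)
            ++ bs.flatMap (fun b => pvEmit (pvBlockDesc b))) := by
  induction ls generalizing descs cur with
  | nil => by_cases hcur : cur = "" <;> simp [pvBlocks, pvEmit, hcur]
  | cons l ls ih =>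
    by_cases hl : pvIsHeader l
    · have hstep : pvStepA (descs, cur) l = (descs ++ pvEmit cur, "") := by
        unfold pvStepA pvEmit
        rw [if_pos hl]
        split <;> simp
      cases h' : pvBlocks ls with
      | nil => exact absurd h' (pvBlocks_ne_nil ls)
      | cons b bs =>
        simp only [List.foldl_cons, hstep, pvBlocks, hl, if_pos, h']
        rw [ih]
        simp [h', pvBlockDesc, pvEmit]
    · have hstep : pvStepA (descs, cur) l = (descs, pvBlockStep cur l) := by
        unfold pvStepA pvBlockStep
        rw [if_neg hl]
        split
        · rfl
        · split <;> rfl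
      cases h' : pvBlocks ls with
      | nil => exact absurd h' (pvBlocks_ne_nil ls)
      | cons b bs =>
        simp only [List.foldl_cons, hstep, pvBlocks, hl, h']
        rw [ih]
        simp [h']

-- A's while-loop pad is an append of replicated fillers
theorem pvPadA_eq (descs : List String) (n : Int) :
    pvPadA descs n = descs ++ List.replicate (n - descs.length).toNat pvFiller := by
  by_cases hlt : (descs.length : Int) < n
  · rw [pvPadA, if_pos hlt, pvPadA_eq (descs ++ [pvFiller]) n]
    have h1 : (n - ((descs ++ [pvFiller]).length : Int)).toNat + 1 = (n - descs.length).toNat := by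
      simp only [List.length_append, List.length_cons, List.length_nil]; omega
    rw [← h1, List.replicate_succ, List.append_assoc, List.singleton_append]
  · rw [pvPadA, if_neg hlt]
    have : (n - descs.length).toNat = 0 := by omega
    simp [this]
termination_by (n - descs.length).toNat
decreasing_by simp only [List.length_append, List.length_cons, List.length_nil]; omega

theorem pvMaxToNat (x : Int) : (max 0 x).toNat = x.toNat := by
  rcases le_total 0 x with h | h
  · rw [max_eq_right h]
  · rw [max_eq_left h]; omega

-- ===== VERDICT (by name: the statement is the Claim_ definition above) =====
theorem extract_panel_descriptions_spec : Claim_equal_extract_panel_descriptions := by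
  intro script num_panels _
  show extract_panel_descriptions script num_panels = extract_panel_descriptions_alt script num_panels
  -- B's block list is pvBlocks of the lines
  have hblocks : (PySem.Str.splitlines script).foldl pvBlocksStep [[]]
      = pvBlocks (PySem.Str.splitlines script) := by
    rw [pvFoldBlocks _ [[]] (by simp)]
    cases h' : pvBlocks (PySem.Str.splitlines script) with
    | nil => exact absurd h' (pvBlocks_ne_nil _)
    | cons b bs => simp [pvConsHead]
  have hstep' : ∀ (out b : List String),
      (if pvBlockDesc b ≠ "" then out ++ [PySem.Str.strip (pvBlockDesc b)] else out)
      = out ++ pvEmit (pvBlockDesc b) := by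
    intro out b; unfold pvEmit; split <;> simp
  -- B's collected descriptions
  have hout : (pvBlocks (PySem.Str.splitlines script)).foldl
      (fun out b => if pvBlockDesc b ≠ "" then out ++ [PySem.Str.strip (pvBlockDesc b)] else out) []
      = (pvBlocks (PySem.Str.splitlines script)).flatMap (fun b => pvEmit (pvBlockDesc b)) := by
    rw [PySem.List.foldl_congr_mem (pvBlocks (PySem.Str.splitlines script))
      (fun out b => if pvBlockDesc b ≠ "" then out ++ [PySem.Str.strip (pvBlockDesc b)] else out)
      (fun out b => out ++ pvEmit (pvBlockDesc b)) []
      (fun acc b _ => hstep' acc b),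
      PySem.List.foldl_append_eq_flatMap]
    simp
  -- the two description lists coincide
  have hdesc : (if (((PySem.Str.splitlines script).foldl pvStepA (([] : List String), "")).2 ≠ "")
       then ((PySem.Str.splitlines script).foldl pvStepA (([] : List String), "")).1
            ++ [PySem.Str.strip (((PySem.Str.splitlines script).foldl pvStepA (([] : List String), "")).2)]
       else ((PySem.Str.splitlines script).foldl pvStepA (([] : List String), "")).1)
      = (pvBlocks (PySem.Str.splitlines script)).flatMap (fun b => pvEmit (pvBlockDesc b)) := by
    rw [pvFoldA _ [] ""]
    cases h' : pvBlocks (PySem.Str.splitlines script) with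
    | nil => exact absurd h' (pvBlocks_ne_nil _)
    | cons b bs => simp [pvBlockDesc]
  simp only [extract_panel_descriptions, extract_panel_descriptions_alt, hblocks, hout, ← hdesc,
    pvPadA_eq, PySem.List.pyRepeat_singleton, pvMaxToNat]
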